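-- pv_equiv track=rewrite | github.com/ak43zhang/gs2026 | src/gs2026/dashboard2/services/pdf_reader.py | _split_strict_by_lines
-- ===== SOURCE A (Python) =====
-- from typing import List, Dict, Optional
--
-- def _split_strict_by_lines(text: str) -> List[str]:
--     """
--     严格逐行分割策略 - 确保每一行都独立，不合并、不过滤
--     适用于需要逐字逐行阅读的场景
--     但会将 *ST 开头的行与前一行合并
--     """
--     lines = text.split('\n')
--     result = []
--     pending_line = ""
--
--     for line in lines:
--         line = line.strip()
--         if not line:
--             continue
--
--         # 处理以 * 开头的行（如 *ST赛隆），与前一行合并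
--         if line.startswith('*') and pending_line:
--             pending_line = pending_line + line
--             continue
--
--         # 如果当前行以 * 开头，暂存等待合并
--         if line.startswith('*'):
--             pending_line = line
--             continue
--
--         # 保存之前的待处理行
--         if pending_line:
--             result.append(pending_line)
--             pending_line = ""
--
--         # 处理当前行
--         result.append(line)
--
--     # 处理最后的待处理行
--     if pending_line:
--         result.append(pending_line)
--
--     return result if result else [text]
-- ===== SOURCE B (Python) =====
-- from typing import List
--
-- def _split_strict_by_lines(text: str) -> List[str]:
--     # stage 1: clean -- strip every line, drop the empty ones
--     lines = [s for s in map(str.strip, text.split('\n')) if s]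
--     # stage 2: group runs -- scan by index; a maximal run of star-prefixed lines joins into one element
--     result: List[str] = []
--     i, n = 0, len(lines)
--     while i < n:
--         if lines[i].startswith('*'):
--             j = i + 1
--             while j < n and lines[j].startswith('*'):
--                 j += 1
--             result.append(''.join(lines[i:j]))
--             i = j
--         else:
--             result.append(lines[i])
--             i += 1
--     return result if result else [text]
-- ===== Notes on version B (the rewrite author's own statement) =====
-- stated objective: alternative
-- what changed: B replaces A's single stateful pass with a pending_line accumulator by two stages: a clean pass (strip lines, drop empties) followed by an index-based run-grouping scan that concatenates each maximal run of star-prefixed lines.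
import Mathlib
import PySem

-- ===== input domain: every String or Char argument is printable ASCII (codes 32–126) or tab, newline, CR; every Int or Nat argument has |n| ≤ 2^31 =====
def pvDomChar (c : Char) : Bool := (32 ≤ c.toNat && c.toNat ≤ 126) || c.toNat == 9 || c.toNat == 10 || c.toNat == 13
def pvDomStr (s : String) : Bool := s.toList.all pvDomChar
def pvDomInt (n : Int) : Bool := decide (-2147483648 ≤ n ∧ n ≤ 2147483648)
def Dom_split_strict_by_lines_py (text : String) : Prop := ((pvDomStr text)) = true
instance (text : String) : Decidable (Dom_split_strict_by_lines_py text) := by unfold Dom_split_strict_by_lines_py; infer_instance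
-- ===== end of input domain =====

-- B replaces A's pending_line accumulator pass by two stages: clean (strip, drop empties), then group maximal star-prefixed runs by index scan (objective: alternative).

-- ===== PORT A =====
-- A's loop body: state is (result, pending_line); branches in A's order
def pvAStep (st : List String × String) (raw : String) : List String × String :=
  let line := PySem.Str.strip raw
  if line = "" then st
  else if PySem.Str.startswith line "*" = true ∧ st.2 ≠ "" then
    (st.1, st.2 ++ line)
  else if PySem.Str.startswith line "*" = true then
    (st.1, line)
  else
    ((if st.2 ≠ "" then st.1 ++ [st.2] else st.1) ++ [line], "")

def split_strict_by_lines_py (text : String) : List String :=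
  let st := (((PySem.Str.split? text "\n").getD [])).foldl pvAStep ([], "")
  let result := if st.2 ≠ "" then st.1 ++ [st.2] else st.1
  if result ≠ [] then result else [text]

-- ===== PORT B =====
-- stage 1 of Source B: strip every line, drop the empty ones
def pvClean (text : String) : List String :=
  (((PySem.Str.split? text "\n").getD []).map PySem.Str.strip).filter (fun s => s ≠ "")

-- stage 2 of Source B: the index run-scan — a maximal run of star-prefixed lines joins into one element
-- (the inner 'while j < n' scan is the takeWhile, 'i = j' the dropWhile)
def pvBGroup : List String → List String
  | [] => []
  | l :: ls =>
    if PySem.Str.startswith l "*" = true then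
      PySem.Str.join "" (l :: ls.takeWhile (fun x => PySem.Str.startswith x "*")) ::
        pvBGroup (ls.dropWhile (fun x => PySem.Str.startswith x "*"))
    else
      l :: pvBGroup ls
termination_by ls => ls.length
decreasing_by
  · exact Nat.lt_succ_of_le (List.length_dropWhile_le _ _)
  · exact Nat.lt_succ_self _

def split_strict_by_lines_py_alt (text : String) : List String :=
  let result := pvBGroup (pvClean text)
  if result ≠ [] then result else [text]

-- ===== PRECONDITION & SPEC =====
def Spec_split_strict_by_lines_py (text : String) (out : List String) : Prop := out = split_strict_by_lines_py_alt text
instance (text : String) (out : List String) : Decidable (Spec_split_strict_by_lines_py text out) := by unfold Spec_split_strict_by_lines_py; infer_instance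

-- ===== CLAIM =====
def Claim_equal_split_strict_by_lines_py : Prop := ∀ (text : String), Dom_split_strict_by_lines_py text → Spec_split_strict_by_lines_py text (split_strict_by_lines_py text)

-- ===== LEMMAS AND PROOFS =====

-- A's loop body as a function of the already-stripped line
def pvG (st : List String × String) (s : String) : List String × String :=
  if s = "" then st
  else if PySem.Str.startswith s "*" = true ∧ st.2 ≠ "" then
    (st.1, st.2 ++ s)
  else if PySem.Str.startswith s "*" = true then
    (st.1, s)
  else
    ((if st.2 ≠ "" then st.1 ++ [st.2] else st.1) ++ [s], "")

-- A's final flush of the pending line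
def pvFin (st : List String × String) : List String :=
  if st.2 ≠ "" then st.1 ++ [st.2] else st.1

theorem pvAStep_eq_g (st : List String × String) (raw : String) :
    pvAStep st raw = pvG st (PySem.Str.strip raw) := rfl

theorem foldl_A_eq_g (l : List String) (st : List String × String) :
    l.foldl pvAStep st = (l.map PySem.Str.strip).foldl pvG st := by
  induction l generalizing st with
  | nil => rfl
  | cons x xs ih => simp only [List.foldl_cons, List.map_cons, pvAStep_eq_g]; exact ih _

theorem foldl_g_filter (l : List String) (st : List String × String) :
    l.foldl pvG st = (l.filter (fun s => s ≠ "")).foldl pvG st := by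
  induction l generalizing st with
  | nil => rfl
  | cons x xs ih =>
      by_cases hx : x = ""
      · have h0 : pvG st "" = st := by unfold pvG; simp
        simp [hx, h0, ih]
      · simp only [List.foldl_cons, List.filter_cons]
        simp [hx, ih]

theorem pv_flat_int (l : List (List Char)) : (List.intersperse [] l).flatten = l.flatten := by
  induction l with
  | nil => rfl
  | cons a t ih => cases t with
    | nil => rfl
    | cons b u => simp_all [List.intersperse]

theorem pv_join_cons (a : String) (t : List String) :
    PySem.Str.join "" (a :: t) = a ++ PySem.Str.join "" t := by
  simp [PySem.Str.join, PySem.Chars.join, List.intercalate, pv_flat_int]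

theorem pv_join_nil : PySem.Str.join "" ([] : List String) = "" := rfl

theorem pv_append_ne_empty (s t : String) (h : s ≠ "") : s ++ t ≠ "" := by
  intro heq
  apply h
  have := congrArg String.toList heq
  simp only [String.toList_append] at this
  exact String.toList_eq_nil_iff.mp (List.append_eq_nil_iff.mp this).1

theorem pvBGroup_nil : pvBGroup [] = [] := by rw [pvBGroup]

theorem pvBGroup_cons_star (l : String) (ls : List String)
    (h : PySem.Str.startswith l "*" = true) :
    pvBGroup (l :: ls) =
      PySem.Str.join "" (l :: ls.takeWhile (fun x => PySem.Str.startswith x "*")) ::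
        pvBGroup (ls.dropWhile (fun x => PySem.Str.startswith x "*")) := by
  rw [pvBGroup, if_pos h]

theorem pvBGroup_cons_nonstar (l : String) (ls : List String)
    (h : ¬ PySem.Str.startswith l "*" = true) :
    pvBGroup (l :: ls) = l :: pvBGroup ls := by
  rw [pvBGroup, if_neg h]

-- core: starting with a star-prefixed pending buffer, A's fold finishes the current run
-- then behaves like pvBGroup; starting with an empty buffer it is pvBGroup outright
theorem pv_main : ∀ n (ls : List String), ls.length ≤ n → (∀ s ∈ ls, s ≠ "") →
    (∀ res, pvFin (ls.foldl pvG (res, "")) = res ++ pvBGroup ls) ∧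
    (∀ res pend, pend ≠ "" →
      pvFin (ls.foldl pvG (res, pend)) =
        res ++ (pend ++ PySem.Str.join "" (ls.takeWhile (fun x => PySem.Str.startswith x "*"))) ::
          pvBGroup (ls.dropWhile (fun x => PySem.Str.startswith x "*"))) := by
  intro n
  induction n with
  | zero =>
      intro ls hlen _
      have hnil : ls = [] := List.eq_nil_of_length_eq_zero (Nat.le_zero.mp hlen)
      subst hnil
      refine ⟨fun res => by simp [pvFin, pvBGroup_nil], fun res pend hp => ?_⟩
      simp only [List.foldl_nil, List.takeWhile_nil, List.dropWhile_nil, pv_join_nil,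
        pvBGroup_nil, pvFin]
      rw [if_pos hp, String.append_empty]
  | succ n ih =>
      intro ls hlen hne
      cases ls with
      | nil =>
          refine ⟨fun res => by simp [pvFin, pvBGroup_nil], fun res pend hp => ?_⟩
          simp only [List.foldl_nil, List.takeWhile_nil, List.dropWhile_nil, pv_join_nil,
            pvBGroup_nil, pvFin]
          rw [if_pos hp, String.append_empty]
      | cons l t =>
          have hl : l ≠ "" := hne l (List.mem_cons_self ..)
          have hnt : ∀ s ∈ t, s ≠ "" := fun s hs => hne s (List.mem_cons_of_mem _ hs)
          have hlt : t.length ≤ n := Nat.le_of_succ_le_succ hlen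
          constructor
          · intro res
            by_cases hs : PySem.Str.startswith l "*" = true
            · -- star head, empty pending: A buffers l
              have hstep : pvG (res, "") l = (res, l) := by
                unfold pvG
                rw [if_neg hl, if_neg (by rintro ⟨_, h⟩; exact h rfl), if_pos hs]
              rw [List.foldl_cons, hstep, (ih t hlt hnt).2 res l hl,
                pvBGroup_cons_star l t hs, pv_join_cons]
            · -- non-star head: A appends l directly
              have hstep : pvG (res, "") l = (res ++ [l], "") := by
                unfold pvG
                rw [if_neg hl, if_neg (by rintro ⟨h, _⟩; exact hs h), if_neg hs]
                simp
              rw [List.foldl_cons, hstep, (ih t hlt hnt).1 (res ++ [l]),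
                pvBGroup_cons_nonstar l t hs, List.append_assoc, List.singleton_append]
          · intro res pend hp
            by_cases hs : PySem.Str.startswith l "*" = true
            · -- star head joins the pending run
              have hstep : pvG (res, pend) l = (res, pend ++ l) := by
                unfold pvG; rw [if_neg hl, if_pos ⟨hs, hp⟩]
              rw [List.foldl_cons, hstep,
                (ih t hlt hnt).2 res (pend ++ l) (pv_append_ne_empty _ _ hp),
                List.takeWhile_cons_of_pos (p := fun x => PySem.Str.startswith x "*") hs,
                List.dropWhile_cons_of_pos (p := fun x => PySem.Str.startswith x "*") hs,
                pv_join_cons, String.append_assoc]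
            · -- non-star head: the run ends, A flushes pend then appends l
              have hsf : ¬ (fun x => PySem.Str.startswith x "*") l = true := hs
              have hstep : pvG (res, pend) l = (res ++ [pend] ++ [l], "") := by
                unfold pvG
                rw [if_neg hl, if_neg (by rintro ⟨h, _⟩; exact hs h), if_neg hs, if_pos hp]
              rw [List.foldl_cons, hstep, (ih t hlt hnt).1 (res ++ [pend] ++ [l]),
                List.takeWhile_cons_of_neg (p := fun x => PySem.Str.startswith x "*") hsf,
                List.dropWhile_cons_of_neg (p := fun x => PySem.Str.startswith x "*") hsf,
                pv_join_nil, String.append_empty, pvBGroup_cons_nonstar l t hs]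
              simp

-- ===== VERDICT =====
theorem split_strict_by_lines_py_spec : Claim_equal_split_strict_by_lines_py := by
  intro text _
  unfold Spec_split_strict_by_lines_py
  have hne : ∀ s ∈ pvClean text, s ≠ "" := by
    intro s hs
    have := (List.mem_filter.mp hs).2
    simpa using this
  have hA : pvFin ((((PySem.Str.split? text "\n").getD [])).foldl pvAStep ([], "")) =
      pvBGroup (pvClean text) := by
    rw [foldl_A_eq_g, foldl_g_filter]
    have := (pv_main (pvClean text).length (pvClean text) le_rfl hne).1 []
    simpa [pvClean] using this
  simp only [pvFin] at hA
  simp only [split_strict_by_lines_py, split_strict_by_lines_py_alt, hA]
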